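-- pv_equiv track=rewrite | github.com/jcoludar/taxembed | visualize_multi_groups.py | find_group_descendants
-- ===== SOURCE A (Python) =====
-- def find_group_descendants(root_taxid, nodes, tax2idx):
--     """Find all descendants of a taxonomic group."""
--     group_indices = set()
--
--     def find_descendants(taxid):
--         # Convert taxid to string for lookup
--         taxid_str = str(taxid)
--         if taxid_str in tax2idx:
--             group_indices.add(tax2idx[taxid_str])
--
--         # Find children
--         for child, parent in nodes.items():
--             if parent == taxid:
--                 find_descendants(child)
--
--     find_descendants(root_taxid)
--     return group_indices
-- ===== SOURCE B (Python) =====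
-- def find_group_descendants(root_taxid, nodes, tax2idx):
--     """Find all descendants of a taxonomic group.
--
--     Different decomposition from A: (1) invert the child->parent dict once into
--     a parent->children adjacency dict, (2) compute the full preorder list of
--     reachable taxids (pure traversal, no lookups), (3) a separate pass maps
--     that list through tax2idx into the result set.
--     """
--     children = {}
--     for child, parent in nodes.items():
--         children.setdefault(parent, []).append(child)
--
--     def reach(taxid):
--         out = [taxid]
--         for c in children.get(taxid, []):
--             out.extend(reach(c))
--         return out
--
--     group_indices = set()
--     for t in reach(root_taxid):
--         idx = tax2idx.get(str(t))
--         if idx is not None: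
--             group_indices.add(idx)
--     return group_indices
-- ===== Notes on version B (the rewrite author's own statement) =====
-- stated objective: alternative
-- what changed: B inverts the child->parent dict once into a parent->children adjacency dict, computes the preorder list of reachable taxids over it (A's scan of the whole nodes dict at every visited taxon disappears), and only then maps that list through tax2idx in a separate pass.
import Mathlib
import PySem

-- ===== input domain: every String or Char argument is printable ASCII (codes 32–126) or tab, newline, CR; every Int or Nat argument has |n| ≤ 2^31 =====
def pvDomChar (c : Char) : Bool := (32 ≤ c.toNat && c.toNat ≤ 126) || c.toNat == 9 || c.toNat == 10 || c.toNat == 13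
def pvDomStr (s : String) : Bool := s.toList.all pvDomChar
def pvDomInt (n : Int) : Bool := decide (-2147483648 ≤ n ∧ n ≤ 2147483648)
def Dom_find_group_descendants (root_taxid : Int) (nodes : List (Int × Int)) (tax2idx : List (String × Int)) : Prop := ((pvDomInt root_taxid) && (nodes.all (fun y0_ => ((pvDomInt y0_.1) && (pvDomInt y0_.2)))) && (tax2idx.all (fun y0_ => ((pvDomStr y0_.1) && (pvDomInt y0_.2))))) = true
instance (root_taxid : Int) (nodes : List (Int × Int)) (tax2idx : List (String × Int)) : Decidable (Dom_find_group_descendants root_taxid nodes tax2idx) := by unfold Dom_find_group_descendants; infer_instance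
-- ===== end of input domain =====

-- B builds a parent→children adjacency dict once, computes the preorder list of
-- reachable taxids over it, then maps that list through tax2idx in a separate
-- pass (objective: alternative — A instead rescans the whole dict per visit).

-- ===== PORT A =====
-- A's inner recursion `find_descendants`: threads the result set through the
-- recursion; fuel is a termination guard only (under Pre_ the recursion depth
-- is bounded by the number of dict entries plus one).
def pvA_visit (nd : List (Int × Int)) (t2i : PySem.Dict String Int) :
    Nat → Int → PySem.Set Int → PySem.Set Int
  | 0, _, s => s
  | fuel + 1, t, s =>
    -- `if str(t) in tax2idx: add tax2idx[str(t)]` ported as one lookup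
    let s1 := match t2i.get? (PySem.Int.toStr t) with
      | some i => PySem.Set.add s i
      | none => s
    nd.foldl (fun acc cp => if cp.2 = t then pvA_visit nd t2i fuel cp.1 acc else acc) s1

def find_group_descendants (root_taxid : Int) (nodes : List (Int × Int)) (tax2idx : List (String × Int)) : List Int :=
  let nd := (PySem.Dict.ofList nodes).items      -- nodes.items() of the Python dict
  pvA_visit nd (PySem.Dict.ofList tax2idx) (nd.length + 1) root_taxid PySem.Set.empty

-- ===== PORT B =====
-- children.setdefault(parent, []).append(child), built in one pass
def pvB_children (nd : List (Int × Int)) : PySem.Dict Int (List Int) :=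
  nd.foldl (fun d cp => d.modify cp.2 [] (fun l => l ++ [cp.1])) PySem.Dict.empty

-- `reach`: the preorder list of reachable taxids (no lookups); fuel is a
-- termination guard only, as for A.
def pvB_reach (ch : PySem.Dict Int (List Int)) : Nat → Int → List Int
  | 0, _ => []
  | fuel + 1, t => t :: (ch.getD t []).flatMap (pvB_reach ch fuel)

def find_group_descendants_alt (root_taxid : Int) (nodes : List (Int × Int)) (tax2idx : List (String × Int)) : List Int :=
  let nd := (PySem.Dict.ofList nodes).items
  let t2i := PySem.Dict.ofList tax2idx
  (pvB_reach (pvB_children nd) (nd.length + 1) root_taxid).foldl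
    (fun s t => match t2i.get? (PySem.Int.toStr t) with
      | some i => PySem.Set.add s i
      | none => s)
    PySem.Set.empty

-- ===== PRECONDITION & SPEC =====
-- pvParentHits d r k t = the parent chain of t (under dict d) reaches r within k steps
def pvParentHits (d : PySem.Dict Int Int) (r : Int) : Nat → Int → Bool
  | Nat.zero, _ => false
  | Nat.succ k, t =>
    match d.get? t with
    | none => false
    | some p => p == r || pvParentHits d r k p

-- Pre_ excludes exactly the inputs where root_taxid lies on a cycle of the
-- child→parent map: there Python A recurses forever (RecursionError), returning nothing.
def Pre_find_group_descendants (root_taxid : Int) (nodes : List (Int × Int)) (tax2idx : List (String × Int)) : Prop :=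
  pvParentHits (PySem.Dict.ofList nodes) root_taxid nodes.length root_taxid = false
instance (root_taxid : Int) (nodes : List (Int × Int)) (tax2idx : List (String × Int)) : Decidable (Pre_find_group_descendants root_taxid nodes tax2idx) := by unfold Pre_find_group_descendants; infer_instance

def pvWitness_find_group_descendants : Int × (List (Int × Int)) × (List (String × Int)) :=
  (1, [(2, 1), (3, 2), (5, 2)], [("2", 0), ("3", 1), ("5", 4)])

def Spec_find_group_descendants (root_taxid : Int) (nodes : List (Int × Int)) (tax2idx : List (String × Int)) (out : List Int) : Prop := out = find_group_descendants_alt root_taxid nodes tax2idx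
instance (root_taxid : Int) (nodes : List (Int × Int)) (tax2idx : List (String × Int)) (out : List Int) : Decidable (Spec_find_group_descendants root_taxid nodes tax2idx out) := by unfold Spec_find_group_descendants; infer_instance

-- ===== CLAIM (what is proved, stated in full; the proofs are below) =====
def Claim_equal_find_group_descendants : Prop := ∀ (root_taxid : Int) (nodes : List (Int × Int)) (tax2idx : List (String × Int)), Dom_find_group_descendants root_taxid nodes tax2idx → Pre_find_group_descendants root_taxid nodes tax2idx → Spec_find_group_descendants root_taxid nodes tax2idx (find_group_descendants root_taxid nodes tax2idx)

-- ===== LEMMAS AND PROOFS =====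

-- B's adjacency lookup is exactly the child list A's inner scan selects, in order.
theorem pvB_children_getD (nd : List (Int × Int)) (t : Int) :
    (pvB_children nd).getD t [] = (nd.filter (fun cp => cp.2 == t)).map (·.1) := by
  have h := PySem.Dict.getD_foldl_modify_append (l := nd.map (fun cp => (cp.2, cp.1)))
      (d := (PySem.Dict.empty : PySem.Dict Int (List Int))) (c := t)
  unfold pvB_children
  simp [List.foldl_map, List.filter_map, List.map_map] at h
  simpa using h

-- generic: folding a filtered list = folding with the guard inside
theorem pv_foldl_filter {α β : Type} (p : α → Bool) (f : β → α → β) :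
    ∀ (l : List α) (s : β),
      (l.filter p).foldl f s = l.foldl (fun a b => if p b then f a b else a) s := by
  intro l
  induction l with
  | nil => intro s; rfl
  | cons x xs ih =>
    intro s
    by_cases h : p x
    · simp [h, ih]
    · simp [h, ih]

-- generic: folding over a flatMap = nested folds
theorem pv_foldl_flatMap {α β γ : Type} (f : α → List β) (g : γ → β → γ) :
    ∀ (l : List α) (s : γ),
      (l.flatMap f).foldl g s = l.foldl (fun a b => (f b).foldl g a) s := by
  intro l
  induction l with
  | nil => intro s; rfl
  | cons x xs ih =>
    intro s
    simp [List.flatMap_cons, List.foldl_append, ih]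

-- A's state-threading visit = folding B's lookup step over B's preorder list
theorem pv_visit_eq_foldl_reach (nd : List (Int × Int)) (t2i : PySem.Dict String Int) :
    ∀ (fuel : Nat) (t : Int) (s : PySem.Set Int),
      pvA_visit nd t2i fuel t s =
        (pvB_reach (pvB_children nd) fuel t).foldl
          (fun a u => match t2i.get? (PySem.Int.toStr u) with
            | some i => PySem.Set.add a i
            | none => a) s := by
  intro fuel
  induction fuel with
  | zero => intro t s; rfl
  | succ n ih =>
    intro t s
    simp only [pvA_visit, pvB_reach, List.foldl_cons]
    rw [pv_foldl_flatMap, pvB_children_getD, List.foldl_map, pv_foldl_filter]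
    simp only [ih, beq_iff_eq]

-- ===== VERDICT (by name: the statement is the Claim_ definition above) =====
theorem find_group_descendants_spec : Claim_equal_find_group_descendants := by
  intro root nodes tax2idx _ _
  unfold Spec_find_group_descendants find_group_descendants find_group_descendants_alt
  exact pv_visit_eq_foldl_reach _ _ _ _ _
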